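-- pv_equiv track=rewrite | github.com/benedictchen/universal-learning | universal_learning/solomonoff_modules/solomonoff_inductor.py | _simulate_lambda_string
-- ===== SOURCE A (Python) =====
-- from typing import Dict, List, Tuple, Any, Optional, Callable, Union
--
-- def _simulate_lambda_string(lambda_expr: str, context: List[int]) -> List[int]:
--     """Simulate lambda expression execution on context"""
--     output = []
--
--     try:
--         # Safe evaluation of simple lambda expressions
--         if "lambda x:" in lambda_expr:
--             # Extract the expression part
--             expr_part = lambda_expr.split("lambda x:")[1].strip()
--
--             # Apply lambda to each element and generate sequence
--             for i, x in enumerate(context + [len(context)]):  # Include next position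
--                 try:
--                     # Safe evaluation with limited operations
--                     if expr_part.isdigit():
--                         result = int(expr_part)
--                     elif expr_part == "x":
--                         result = x
--                     elif expr_part == "x + 1":
--                         result = x + 1
--                     elif expr_part == "x * 2":
--                         result = x * 2
--                     elif expr_part == "x // 2":
--                         result = x // 2 if x > 0 else 0
--                     elif expr_part == "x % 2":
--                         result = x % 2
--                     elif "if" in expr_part:
--                         # Handle simple conditionals
--                         if "x > 0" in expr_part:
--                             result = 1 if x > 0 else 0
--                         elif "x % 2 == 0" in expr_part:
--                             result = 1 if x % 2 == 0 else 0
--                         else: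
--                             result = 0
--                     else:
--                         result = 0
--
--                     output.append(result)
--
--                 except:
--                     output.append(0)
--
--     except Exception:
--         return []
--
--     return output
-- ===== SOURCE B (Python) =====
-- def _compile(expr):
--     """Compile the expression string once into a small data tag."""
--     if expr.isdigit():
--         return ("const", int(expr))
--     table = {"x": ("var",), "x + 1": ("add1",), "x * 2": ("mul2",),
--              "x // 2": ("half",), "x % 2": ("mod2",)}
--     if expr in table:
--         return table[expr]
--     if "if" in expr:
--         if "x > 0" in expr:
--             return ("pos",)
--         if "x % 2 == 0" in expr:
--             return ("even",)
--     return ("zero",)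
--
--
-- def _eval(rule, x):
--     """Interpret one compiled rule on one value."""
--     tag = rule[0]
--     if tag == "const":
--         return rule[1]
--     if tag == "var":
--         return x
--     if tag == "add1":
--         return x + 1
--     if tag == "mul2":
--         return x * 2
--     if tag == "half":
--         return x // 2 if x > 0 else 0
--     if tag == "mod2":
--         return x % 2
--     if tag == "pos":
--         return 1 if x > 0 else 0
--     if tag == "even":
--         return 1 - x % 2
--     return 0
--
--
-- def _run(rule, xs):
--     """Build the output back to front, then reverse once."""
--     out = []
--     for i in range(len(xs) - 1, -1, -1):
--         out.append(_eval(rule, xs[i]))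
--     out.reverse()
--     return out
--
--
-- def _simulate_lambda_string(lambda_expr, context):
--     """Compile the lambda body to a tiny IR once, then interpret it recursively."""
--     if "lambda x:" not in lambda_expr:
--         return []
--     expr = lambda_expr.split("lambda x:")[1].strip()
--     return _run(_compile(expr), context + [len(context)])
-- ===== Notes on version B (the rewrite author's own statement) =====
-- stated objective: alternative
-- what changed: A re-runs a string if/elif chain inside the loop; B compiles the expression once into a small data-tag IR (via a dict table for the fixed forms), then a separate interpreter pass builds the output back-to-front over reversed indices and reverses once.
import Mathlib
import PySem

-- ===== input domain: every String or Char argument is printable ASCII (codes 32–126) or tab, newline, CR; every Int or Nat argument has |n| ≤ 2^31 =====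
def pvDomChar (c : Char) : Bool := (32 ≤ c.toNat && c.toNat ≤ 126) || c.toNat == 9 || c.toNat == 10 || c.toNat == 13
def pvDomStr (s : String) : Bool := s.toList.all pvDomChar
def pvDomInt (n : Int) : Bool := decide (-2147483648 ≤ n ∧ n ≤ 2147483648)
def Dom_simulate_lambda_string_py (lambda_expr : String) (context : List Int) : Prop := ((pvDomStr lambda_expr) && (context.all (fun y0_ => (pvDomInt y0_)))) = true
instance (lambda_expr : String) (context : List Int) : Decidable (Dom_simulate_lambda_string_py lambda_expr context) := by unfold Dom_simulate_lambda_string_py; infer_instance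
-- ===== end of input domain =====

-- B compiles the lambda body once into a small data-tag IR (dict table for the fixed
-- forms) and a separate interpreter builds the output back-to-front, reversing once
-- (objective: alternative).


-- ===== PORT A =====
-- literal transliteration of A: guard, split/strip, then a fold whose body runs the
-- whole if/elif chain on every element (the inner try can only succeed; the outer
-- except path is the unreachable none of the [1] indexing).
def simulate_lambda_string_py (lambda_expr : String) (context : List Int) : List Int :=
  if PySem.Str.isIn "lambda x:" lambda_expr then
    match (PySem.Str.split? lambda_expr "lambda x:").bind (fun parts => PySem.List.pyGet? parts 1) with
    | none => []   -- outer 'except Exception: return []' (unreachable under the guard)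
    | some p =>
      let expr_part := PySem.Str.strip p
      (context ++ [(context.length : Int)]).foldl (fun output x =>
        output ++ [
          if PySem.Str.strIsdigit expr_part then (PySem.Int.ofStr? expr_part).getD 0
          else if expr_part = "x" then x
          else if expr_part = "x + 1" then x + 1
          else if expr_part = "x * 2" then x * 2
          else if expr_part = "x // 2" then (if x > 0 then PySem.Int.floordiv x 2 else 0)
          else if expr_part = "x % 2" then PySem.Int.mod x 2
          else if PySem.Str.isIn "if" expr_part then
            (if PySem.Str.isIn "x > 0" expr_part then (if x > 0 then 1 else 0)
             else if PySem.Str.isIn "x % 2 == 0" expr_part then (if PySem.Int.mod x 2 = 0 then 1 else 0)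
             else 0)
          else 0]) []
  else []

-- ===== PORT B =====
-- B's tiny IR: one tag per recognised expression form.
inductive PvRule : Type
  | const : Int → PvRule
  | var | add1 | mul2 | half | mod2 | pos | even | zero
  deriving DecidableEq, Repr

-- B's _compile: classify the expression string once into a data tag.
def pvCompile (expr : String) : PvRule :=
  if PySem.Str.strIsdigit expr then .const ((PySem.Int.ofStr? expr).getD 0)
  else
    let table : PySem.Dict String PvRule :=
      PySem.Dict.ofList [("x", .var), ("x + 1", .add1), ("x * 2", .mul2),
                         ("x // 2", .half), ("x % 2", .mod2)]
    match table.get? expr with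
    | some r => r
    | none =>
      if PySem.Str.isIn "if" expr then
        if PySem.Str.isIn "x > 0" expr then .pos
        else if PySem.Str.isIn "x % 2 == 0" expr then .even
        else .zero
      else .zero

-- B's _eval: interpret one compiled rule on one value.
def pvEval (rule : PvRule) (x : Int) : Int :=
  match rule with
  | .const n => n
  | .var => x
  | .add1 => x + 1
  | .mul2 => x * 2
  | .half => if x > 0 then PySem.Int.floordiv x 2 else 0
  | .mod2 => PySem.Int.mod x 2
  | .pos => if x > 0 then 1 else 0
  | .even => 1 - PySem.Int.mod x 2
  | .zero => 0

-- B's _run: append results over the reversed index range, then reverse once.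
-- xs[i] is always in range here; Python's xs[i] is ported as pyGet? with getD 0.
def pvRun (rule : PvRule) (xs : List Int) : List Int :=
  ((PySem.List.pyRange ((xs.length : Int) - 1) (-1) (-1)).foldl
    (fun out i => out ++ [pvEval rule ((PySem.List.pyGet? xs i).getD 0)]) []).reverse

-- literal transliteration of B: guard, split/strip, compile once, interpret.
def simulate_lambda_string_py_alt (lambda_expr : String) (context : List Int) : List Int :=
  if PySem.Str.isIn "lambda x:" lambda_expr then
    match (PySem.Str.split? lambda_expr "lambda x:").bind (fun parts => PySem.List.pyGet? parts 1) with
    | none => []   -- parts[1] cannot be missing under the guard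
    | some p =>
      let expr := PySem.Str.strip p
      pvRun (pvCompile expr) (context ++ [(context.length : Int)])
  else []

-- ===== PRECONDITION & SPEC =====
def Spec_simulate_lambda_string_py (lambda_expr : String) (context : List Int) (out : List Int) : Prop := out = simulate_lambda_string_py_alt lambda_expr context
instance (lambda_expr : String) (context : List Int) (out : List Int) : Decidable (Spec_simulate_lambda_string_py lambda_expr context out) := by unfold Spec_simulate_lambda_string_py; infer_instance

-- ===== CLAIM (what is proved, stated in full; the proofs are below) =====
def Claim_equal_simulate_lambda_string_py : Prop := ∀ (lambda_expr : String) (context : List Int), Dom_simulate_lambda_string_py lambda_expr context → Spec_simulate_lambda_string_py lambda_expr context (simulate_lambda_string_py lambda_expr context)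

-- ===== LEMMAS AND PROOFS =====

-- the reversed index range is range n mapped through k ↦ n-1-k
theorem pv_pyRange_rev (n : Nat) :
    PySem.List.pyRange ((n : Int) - 1) (-1) (-1)
      = (List.range n).map (fun k : Nat => (n : Int) - 1 - (k : Int)) := by
  simp only [PySem.List.pyRange]
  rw [if_neg (by norm_num), if_neg (by norm_num)]
  by_cases h : (-1 : Int) < (n : Int) - 1
  · rw [if_pos h]
    have hc : (((n : Int) - 1 - -1 + - -1 - 1) / - -1).toNat = n := by norm_num
    rw [hc]
    apply List.map_congr_left
    intro k _
    ring
  · have hn : n = 0 := by omega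
    subst hn
    rw [if_neg h]
    simp

-- B's back-to-front interpreter pass computes the forward map of the evaluator
theorem pv_run_eq_map (rule : PvRule) (xs : List Int) :
    pvRun rule xs = xs.map (pvEval rule) := by
  unfold pvRun
  rw [pv_pyRange_rev xs.length, PySem.List.foldl_append_singleton_eq_map]
  simp only [List.nil_append, List.map_map]
  apply List.ext_getElem
  · simp
  · intro i h1 h2
    simp only [List.length_reverse, List.length_map, List.length_range] at h1
    simp only [List.getElem_reverse, List.length_map, List.length_range,
      List.getElem_map, List.getElem_range, Function.comp]
    have hix : ((xs.length : Int) - 1 - ((xs.length - 1 - i : Nat) : Int)) = (i : Int) := by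
      omega
    rw [hix, PySem.List.pyGet?_natCast]
    simp only [List.length_map] at h2
    rw [List.getElem?_eq_getElem h2]
    rfl

-- interpreting the compiled rule equals A's per-element if/elif chain
theorem pv_eval_compile (e : String) (x : Int) :
    pvEval (pvCompile e) x =
      (if PySem.Str.strIsdigit e then (PySem.Int.ofStr? e).getD 0
       else if e = "x" then x
       else if e = "x + 1" then x + 1
       else if e = "x * 2" then x * 2
       else if e = "x // 2" then (if x > 0 then PySem.Int.floordiv x 2 else 0)
       else if e = "x % 2" then PySem.Int.mod x 2
       else if PySem.Str.isIn "if" e then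
         (if PySem.Str.isIn "x > 0" e then (if x > 0 then 1 else 0)
          else if PySem.Str.isIn "x % 2 == 0" e then (if PySem.Int.mod x 2 = 0 then 1 else 0)
          else 0)
       else 0) := by
  unfold pvCompile
  by_cases hd : PySem.Str.strIsdigit e
  · simp only [if_pos hd, pvEval]
  · simp only [if_neg hd]
    have htab : PySem.Dict.ofList [("x", PvRule.var), ("x + 1", PvRule.add1), ("x * 2", PvRule.mul2),
        ("x // 2", PvRule.half), ("x % 2", PvRule.mod2)]
      = PySem.Dict.mk [("x", PvRule.var), ("x + 1", PvRule.add1), ("x * 2", PvRule.mul2),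
        ("x // 2", PvRule.half), ("x % 2", PvRule.mod2)] := by decide
    rw [htab]
    by_cases h1 : e = "x"
    · subst h1; simp [PySem.Dict.get?_mk_cons, pvEval]
    by_cases h2 : e = "x + 1"
    · subst h2; simp [PySem.Dict.get?_mk_cons, pvEval]
    by_cases h3 : e = "x * 2"
    · subst h3; simp [PySem.Dict.get?_mk_cons, pvEval]
    by_cases h4 : e = "x // 2"
    · subst h4; simp [PySem.Dict.get?_mk_cons, pvEval]
    by_cases h5 : e = "x % 2"
    · subst h5; simp [PySem.Dict.get?_mk_cons, pvEval]
    · have hget : (PySem.Dict.mk [("x", PvRule.var), ("x + 1", PvRule.add1), ("x * 2", PvRule.mul2),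
          ("x // 2", PvRule.half), ("x % 2", PvRule.mod2)]).get? e = none := by
        simp [PySem.Dict.get?,
          Ne.symm h1, Ne.symm h2, Ne.symm h3, Ne.symm h4, Ne.symm h5]
      rw [hget]
      simp only [h1, h2, h3, h4, h5, if_false]
      split_ifs <;> simp_all [pvEval]

-- ===== VERDICT (by name: the statement is the Claim_ definition above) =====
theorem simulate_lambda_string_py_spec : Claim_equal_simulate_lambda_string_py := by
  intro lambda_expr context _
  unfold Spec_simulate_lambda_string_py simulate_lambda_string_py simulate_lambda_string_py_alt
  split
  · split
    · rfl
    · rw [pv_run_eq_map, PySem.List.foldl_append_singleton_eq_map, List.nil_append]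
      apply List.map_congr_left
      intro x _
      exact (pv_eval_compile _ x).symm
  · rfl
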